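-- pv_equiv track=rewrite | github.com/prongupt/WP-Remediation-MoP | SN_extract.py | prepare_table_for_display
-- ===== SOURCE A (Python) =====
-- def prepare_table_for_display(raw_data):
--     processed_data = []
--     current_hostname = None
--     for row in raw_data:
--         hostname = row[0]
--         if hostname == current_hostname:
--             processed_data.append([''] + row[1:])  # Replace hostname with empty string
--         else:
--             processed_data.append(row)
--             current_hostname = hostname
--     return processed_data
-- ===== SOURCE B (Python) =====
-- def prepare_table_for_display(raw_data):
--     # Group consecutive rows by hostname: keep each group's first row,
--     # blank the hostname of the rest.  Index/span-based, no running state.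
--     processed_data = []
--     i = 0
--     n = len(raw_data)
--     while i < n:
--         key = raw_data[i][0]
--         processed_data.append(raw_data[i])
--         j = i + 1
--         while j < n and raw_data[j][0] == key:
--             processed_data.append([''] + raw_data[j][1:])
--             j += 1
--         i = j
--     return processed_data
-- ===== Notes on version B (the rewrite author's own statement) =====
-- stated objective: alternative
-- what changed: Replaces A's single state-machine pass with a current_hostname sentinel by a span/group decomposition: an outer loop that takes each block of consecutive rows sharing a hostname, keeps the block's first row and blanks the rest.
import Mathlib
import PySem

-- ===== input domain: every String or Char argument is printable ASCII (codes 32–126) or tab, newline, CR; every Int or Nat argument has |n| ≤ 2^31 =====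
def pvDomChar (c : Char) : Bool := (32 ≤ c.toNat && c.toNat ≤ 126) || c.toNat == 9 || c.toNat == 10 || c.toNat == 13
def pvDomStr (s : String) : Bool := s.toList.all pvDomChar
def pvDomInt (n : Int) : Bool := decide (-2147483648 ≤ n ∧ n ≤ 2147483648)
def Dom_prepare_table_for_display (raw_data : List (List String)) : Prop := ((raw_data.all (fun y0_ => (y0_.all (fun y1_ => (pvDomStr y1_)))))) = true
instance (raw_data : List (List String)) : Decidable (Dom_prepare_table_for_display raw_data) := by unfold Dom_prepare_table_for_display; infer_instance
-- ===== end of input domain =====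

-- B replaces A's sentinel state machine by a span/group decomposition; same cost, alternative structure.
-- ===== PORT A =====
-- the loop, as structural recursion over the same state (current_hostname : Option String,
-- None → none); row[0] is row.head? (none = IndexError, excluded by Pre_); row[1:] is row.tail
def pvAGo : Option String → List (List String) → List (List String)
  | _, [] => []
  | cur, row :: rest =>
    if row.head? = cur then ("" :: row.tail) :: pvAGo cur rest
    else row :: pvAGo row.head? rest

def prepare_table_for_display (raw_data : List (List String)) : List (List String) :=
  pvAGo none raw_data

-- ===== PORT B =====
-- inner while loop: split off the consecutive rows whose hostname equals key, blanked
def pvSpanBlank (key : Option String) : List (List String) → List (List String) × List (List String)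
  | [] => ([], [])
  | r :: rest =>
    if r.head? = key then
      let p := pvSpanBlank key rest
      (("" :: r.tail) :: p.1, p.2)
    else ([], r :: rest)

theorem pvSpanBlank_len (key : Option String) : ∀ l : List (List String), (pvSpanBlank key l).2.length ≤ l.length
  | [] => Nat.le_refl _
  | r :: rest => by
    simp only [pvSpanBlank]
    split
    · exact Nat.le_succ_of_le (pvSpanBlank_len key rest)
    · exact Nat.le_refl _

-- outer while loop: one group per iteration
def prepare_table_for_display_alt : List (List String) → List (List String)
  | [] => []
  | r :: rest =>
    let p := pvSpanBlank r.head? rest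
    r :: (p.1 ++ prepare_table_for_display_alt p.2)
  termination_by l => l.length
  decreasing_by
    exact Nat.lt_succ_of_le (pvSpanBlank_len r.head? rest)

-- ===== PRECONDITION & SPEC =====
-- Pre_ excludes inputs containing an empty row: there both Pythons raise IndexError on row[0].
def Pre_prepare_table_for_display (raw_data : List (List String)) : Prop :=
  ∀ row ∈ raw_data, row ≠ []
instance (raw_data : List (List String)) : Decidable (Pre_prepare_table_for_display raw_data) := by unfold Pre_prepare_table_for_display; infer_instance

def pvWitness_prepare_table_for_display : List (List String) :=
  [["a", "1"], ["a", "2"], ["b", "3"]]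

def Spec_prepare_table_for_display (raw_data : List (List String)) (out : List (List String)) : Prop := out = prepare_table_for_display_alt raw_data
instance (raw_data : List (List String)) (out : List (List String)) : Decidable (Spec_prepare_table_for_display raw_data out) := by unfold Spec_prepare_table_for_display; infer_instance

-- ===== CLAIM (what is proved, stated in full; the proofs are below) =====
def Claim_equal_prepare_table_for_display : Prop := ∀ (raw_data : List (List String)), Dom_prepare_table_for_display raw_data → Pre_prepare_table_for_display raw_data → Spec_prepare_table_for_display raw_data (prepare_table_for_display raw_data)

-- ===== LEMMAS AND PROOFS =====
-- A's pass over a suffix, with current hostname `key`, is exactly: the blanked span of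
-- rows matching `key`, followed by B's fresh processing of the remainder.
theorem pvAGo_eq_span : ∀ (n : Nat) (l : List (List String)) (key : Option String),
    l.length ≤ n →
    pvAGo key l = (pvSpanBlank key l).1 ++ prepare_table_for_display_alt (pvSpanBlank key l).2 := by
  intro n
  induction n with
  | zero =>
    intro l key h
    have : l = [] := List.length_eq_zero_iff.mp (Nat.le_zero.mp h)
    subst this
    simp [pvAGo, pvSpanBlank, prepare_table_for_display_alt]
  | succ n ih =>
    intro l key h
    cases l with
    | nil => simp [pvAGo, pvSpanBlank, prepare_table_for_display_alt]
    | cons r rest =>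
      by_cases hk : r.head? = key
      · simp only [pvAGo, pvSpanBlank, if_pos hk]
        have := ih rest key (by simpa using Nat.le_of_succ_le_succ h)
        simp [this]
      · simp only [pvAGo, pvSpanBlank, if_neg hk]
        rw [prepare_table_for_display_alt]
        have hlen : (pvSpanBlank r.head? rest).2.length ≤ n :=
          Nat.le_trans (pvSpanBlank_len r.head? rest) (by simpa using Nat.le_of_succ_le_succ h)
        have := ih rest r.head? (by simpa using Nat.le_of_succ_le_succ h)
        simp [this]

-- ===== VERDICT (by name: the statement is the Claim_ definition above) =====
theorem prepare_table_for_display_spec : Claim_equal_prepare_table_for_display := by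
  intro raw_data _ hpre
  unfold Spec_prepare_table_for_display prepare_table_for_display
  cases raw_data with
  | nil => simp [pvAGo, prepare_table_for_display_alt]
  | cons r rest =>
    have hr : r ≠ [] := hpre r (List.mem_cons_self ..)
    have hk : r.head? ≠ none := by
      cases r with
      | nil => exact absurd rfl hr
      | cons a t => simp
    simp only [pvAGo, if_neg hk]
    rw [prepare_table_for_display_alt]
    have := pvAGo_eq_span rest.length rest r.head? (Nat.le_refl _)
    simp [this]
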